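-- pv_equiv track=rewrite | github.com/markunya/bhw2-machine-translation | utils/utils.py | unbreak_indices
-- ===== SOURCE A (Python) =====
-- from typing import List, Tuple
--
-- class IDX:
--     UNK = 0
--     PAD = 1
--     BOS = 2
--     EOS = 3
--     NUM = 4
--
-- def remove_bos_eos(indices):
--     if len(indices) > 0 and indices[0] == IDX.BOS:
--         indices = indices[1:]
--     if len(indices) > 0 and indices[-1] == IDX.EOS:
--         indices = indices[:-1]
--     return indices
--
-- def unbreak_indices(indices_arr: List[List[int]], separators: List[int]) -> List[int]:
--     assert 0 <= len(indices_arr) - len(separators) <= 1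
--     indices_arr = [remove_bos_eos(indices) for indices in indices_arr]
--     separators = [[separator] for separator in separators]
--     result = [None] * (len(indices_arr) + len(separators))
--     result[0::2] = indices_arr
--     result[1::2] = separators
--     result = [IDX.BOS] + [idx for indices in result for idx in indices] + [IDX.EOS]
--     return result
-- ===== SOURCE B (Python) =====
-- from typing import List, Tuple
--
-- class IDX:
--     UNK = 0
--     PAD = 1
--     BOS = 2
--     EOS = 3
--     NUM = 4
--
-- def _strip(indices):
--     start = 1 if indices[:1] == [IDX.BOS] else 0
--     stop = len(indices) - 1 if len(indices) > start and indices[-1] == IDX.EOS else len(indices)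
--     return indices[start:stop]
--
-- def unbreak_indices(indices_arr: List[List[int]], separators: List[int]) -> List[int]:
--     assert 0 <= len(indices_arr) - len(separators) <= 1
--     result = [IDX.BOS]
--     for indices, sep in zip(indices_arr, separators):
--         result += _strip(indices)
--         result.append(sep)
--     if len(indices_arr) > len(separators):
--         result += _strip(indices_arr[-1])
--     result.append(IDX.EOS)
--     return result
-- ===== Notes on version B (the rewrite author's own statement) =====
-- stated objective: simpler
-- what changed: Replaces the preallocated [None]*(n+m) buffer with strided slice assignments result[0::2]/result[1::2] plus a separate flattening comprehension by one direct pass: a zip loop that extends the result with each cleaned list and its separator, then a conditional trailing list, so the result is flattened while it is built.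
import Mathlib
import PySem

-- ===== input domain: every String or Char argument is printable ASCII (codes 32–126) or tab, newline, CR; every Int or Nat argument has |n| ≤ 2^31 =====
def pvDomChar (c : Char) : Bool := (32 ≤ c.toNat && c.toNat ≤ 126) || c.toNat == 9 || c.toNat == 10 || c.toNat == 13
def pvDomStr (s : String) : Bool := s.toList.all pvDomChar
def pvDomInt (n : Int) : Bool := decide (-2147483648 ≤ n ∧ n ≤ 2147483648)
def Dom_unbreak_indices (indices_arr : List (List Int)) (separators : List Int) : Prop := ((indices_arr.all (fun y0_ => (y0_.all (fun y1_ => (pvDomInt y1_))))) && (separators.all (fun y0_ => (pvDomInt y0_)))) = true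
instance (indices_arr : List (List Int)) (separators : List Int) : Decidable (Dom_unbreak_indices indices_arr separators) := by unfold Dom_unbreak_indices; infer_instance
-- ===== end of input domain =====

-- B replaces the preallocated strided-slice interleave (result[0::2]/result[1::2] plus a separate
-- flattening comprehension) by one direct zip loop that flattens while appending each separator,
-- plus a conditional trailing segment (objective: simpler).

-- ===== PORT A =====
-- helper remove_bos_eos, transliterated
def pvRemoveBosEos (indices : List Int) : List Int :=
  let indices :=
    if indices.length > 0 && (PySem.List.pyGet? indices 0 == some 2)
    then PySem.List.slice indices (some 1) none else indices
  let indices :=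
    if indices.length > 0 && (PySem.List.pyGet? indices (-1) == some 3)
    then PySem.List.slice indices none (some (-1)) else indices
  indices

-- the strided assignments result[0::2] = indices_arr, result[1::2] = separators: under A's assert
-- the slots alternate cleaned list / [separator], which this interleave fills step for step
def pvInterleave (xs ys : List (List Int)) : List (List Int) :=
  match xs, ys with
  | [], _ => []
  | x :: _, [] => [x]
  | x :: xs, y :: ys => x :: y :: pvInterleave xs ys

def unbreak_indices (indices_arr : List (List Int)) (separators : List Int) : List Int :=
  let indices_arr := indices_arr.map pvRemoveBosEos
  let separators := separators.map (fun separator => [separator])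
  let result := pvInterleave indices_arr separators
  [2] ++ result.flatMap (fun indices => indices) ++ [3]

-- ===== PORT B =====
-- helper _strip, transliterated
def pvStrip (indices : List Int) : List Int :=
  let start : Int := if PySem.List.slice indices none (some 1) == [2] then 1 else 0
  let stop : Int :=
    if (indices.length : Int) > start && (PySem.List.pyGet? indices (-1) == some 3)
    then (indices.length : Int) - 1 else (indices.length : Int)
  PySem.List.slice indices (some start) (some stop)

def unbreak_indices_alt (indices_arr : List (List Int)) (separators : List Int) : List Int :=
  let result := (indices_arr.zip separators).foldl
    (fun acc p => (acc ++ pvStrip p.1) ++ [p.2]) [2]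
  let result :=
    if separators.length < indices_arr.length
    then result ++ pvStrip ((PySem.List.pyGet? indices_arr (-1)).getD [])
    else result
  result ++ [3]

-- ===== PRECONDITION & SPEC =====
-- Pre_ excludes exactly the inputs on which A raises (its assert fails, AssertionError):
-- 0 <= len(indices_arr) - len(separators) <= 1
def Pre_unbreak_indices (indices_arr : List (List Int)) (separators : List Int) : Prop :=
  separators.length ≤ indices_arr.length ∧ indices_arr.length ≤ separators.length + 1
instance (indices_arr : List (List Int)) (separators : List Int) : Decidable (Pre_unbreak_indices indices_arr separators) := by unfold Pre_unbreak_indices; infer_instance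
def pvWitness_unbreak_indices : List (List Int) × List Int := ([[2, 5, 6, 3], [7, 8]], [4])

def Spec_unbreak_indices (indices_arr : List (List Int)) (separators : List Int) (out : List Int) : Prop := out = unbreak_indices_alt indices_arr separators
instance (indices_arr : List (List Int)) (separators : List Int) (out : List Int) : Decidable (Spec_unbreak_indices indices_arr separators out) := by unfold Spec_unbreak_indices; infer_instance

-- ===== CLAIM (what is proved, stated in full; the proofs are below) =====
def Claim_equal_unbreak_indices : Prop := ∀ (indices_arr : List (List Int)) (separators : List Int), Dom_unbreak_indices indices_arr separators → Pre_unbreak_indices indices_arr separators → Spec_unbreak_indices indices_arr separators (unbreak_indices indices_arr separators)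

-- ===== LEMMAS AND PROOFS =====
-- helper lemmas for the slice computations used by pvStrip_eq_removeBosEos
lemma pvSliceFull (l : List Int) :
    PySem.List.slice l (some 0) (some (l.length : Int)) = l := by
  rw [PySem.List.slice_toNat _ le_rfl (by positivity)]
  simp

lemma pvSlicePred (a : Int) (t : List Int) :
    PySem.List.slice (a :: t) (some 0) (some (((a :: t).length : Int) - 1)) = (a :: t).dropLast := by
  rw [PySem.List.slice_toNat _ le_rfl (by simp)]
  rw [List.dropLast_eq_take]
  congr 1
  omega

lemma pvSliceTail (a : Int) (t : List Int) :
    PySem.List.slice (a :: t) (some 1) (some ((a :: t).length : Int)) = t := by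
  rw [PySem.List.slice_toNat _ (by norm_num) (by positivity)]
  simp

lemma pvSliceTailPred (a : Int) (t : List Int) :
    PySem.List.slice (a :: t) (some 1) (some (((a :: t).length : Int) - 1)) = t.dropLast := by
  rw [PySem.List.slice_toNat _ (by norm_num) (by simp)]
  rw [List.dropLast_eq_take]
  simp only [List.length_cons]
  congr 1
  omega

lemma pvStrip_eq (l : List Int) : pvStrip l = pvRemoveBosEos l := by
  rcases l with _ | ⟨a, t⟩
  · decide
  · have hs : PySem.List.slice (a :: t) none (some 1) = [a] := by
      rw [PySem.List.slice_to _ (by norm_num)]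
      simp
    rw [pvStrip, pvRemoveBosEos]
    simp only [hs, PySem.List.slice_from_one, PySem.List.slice_to_neg_one,
      PySem.List.pyGet?_neg_one, PySem.List.pyGet?_zero, List.getElem?_cons_zero,
      List.length_cons, List.tail_cons, Nat.succ_pos, decide_true, Bool.true_and]
    by_cases ha : a = 2
    · subst ha
      simp only [beq_self_eq_true, if_true]
      rcases t with _ | ⟨b, u⟩
      · decide
      · have hgt : (decide ((((b :: u).length + 1 : Nat) : Int) > 1)) = true := by
          rw [decide_eq_true_eq, List.length_cons]
          push_cast
          omega
        have hpos : (decide ((b :: u).length > 0)) = true := by simp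
        rw [List.getLast?_cons_cons, hgt, hpos]
        simp only [Bool.true_and]
        by_cases h3 : (b :: u).getLast? = some 3
        · rw [h3]
          simp only [beq_self_eq_true, if_true]
          have := pvSliceTailPred 2 (b :: u)
          simp only [List.length_cons] at this ⊢
          exact this
        · have hf : ((b :: u).getLast? == some 3) = false := by simp [h3]
          rw [hf]
          simp only [Bool.false_eq_true, ite_false]
          have := pvSliceTail 2 (b :: u)
          simp only [List.length_cons] at this ⊢
          exact this
    · have hne : (([a] : List Int) == [2]) = false := by simp [ha]
      have hne2 : ((some a : Option Int) == some 2) = false := by simp [ha]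
      simp only [hne, hne2, Bool.false_eq_true, ite_false,
        List.length_cons, Nat.succ_pos, decide_true, Bool.true_and]
      have hgt : (decide (((t.length + 1 : Nat) : Int) > 0)) = true := by
        rw [decide_eq_true_eq]
        positivity
      rw [hgt]
      simp only [Bool.true_and]
      by_cases h3 : (a :: t).getLast? = some 3
      · rw [h3]
        simp only [beq_self_eq_true, if_true]
        have := pvSlicePred a t
        simp only [List.length_cons] at this ⊢
        exact this
      · have hf : ((a :: t).getLast? == some 3) = false := by simp [h3]
        rw [hf]
        simp only [Bool.and_false, Bool.false_eq_true, ite_false]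
        have := pvSliceFull (a :: t)
        simp only [List.length_cons] at this ⊢
        exact this
lemma pvCore (arr : List (List Int)) :
    ∀ seps : List Int, seps.length ≤ arr.length → arr.length ≤ seps.length + 1 →
    (pvInterleave (arr.map pvRemoveBosEos) (seps.map (fun s => [s]))).flatMap (fun x => x)
      = (arr.zip seps).flatMap (fun p => pvRemoveBosEos p.1 ++ [p.2]) ++
        (if seps.length < arr.length
         then pvRemoveBosEos ((PySem.List.pyGet? arr (-1)).getD [])
         else []) := by
  induction arr with
  | nil =>
    intro seps h1 h2
    have : seps = [] := List.eq_nil_of_length_eq_zero (Nat.le_zero.mp (by simpa using h1))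
    subst this
    simp [pvInterleave]
  | cons a arr ih =>
    intro seps h1 h2
    rcases seps with _ | ⟨s, seps⟩
    · have : arr = [] := List.eq_nil_of_length_eq_zero (by simp only [List.length_cons, List.length_nil] at h2; omega)
      subst this
      simp [pvInterleave, PySem.List.pyGet?_neg_one]
    · simp only [List.map_cons, pvInterleave, List.flatMap_cons, List.zip_cons_cons,
        List.length_cons]
      rw [ih seps (by simpa using h1) (by simpa using h2)]
      rcases arr with _ | ⟨b, arr⟩
      · have : seps = [] := List.eq_nil_of_length_eq_zero (Nat.le_zero.mp (by simpa using h1))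
        subst this
        simp [pvInterleave]
      · have hget : PySem.List.pyGet? (a :: b :: arr) (-1) = PySem.List.pyGet? (b :: arr) (-1) := by
          rw [PySem.List.pyGet?_neg_one, PySem.List.pyGet?_neg_one, List.getLast?_cons_cons]
        rw [hget]
        simp only [List.length_cons, Nat.add_lt_add_iff_right]
        simp [List.append_assoc]

-- ===== VERDICT (by name: the statement is the Claim_ definition above) =====
theorem unbreak_indices_spec : Claim_equal_unbreak_indices := by
  intro arr seps _ hpre
  obtain ⟨h1, h2⟩ := hpre
  unfold Spec_unbreak_indices
  rw [unbreak_indices, unbreak_indices_alt]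
  have hstep : (fun (acc : List Int) (p : List Int × Int) => (acc ++ pvStrip p.1) ++ [p.2])
      = (fun (acc : List Int) (p : List Int × Int) => acc ++ (pvStrip p.1 ++ [p.2])) := by
    funext acc p
    rw [List.append_assoc]
  rw [hstep, PySem.List.foldl_append_eq_flatMap]
  simp only [pvStrip_eq]
  rw [pvCore arr seps h1 h2]
  by_cases hc : seps.length < arr.length
  · simp [hc, List.append_assoc]
  · simp [hc]
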